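-- pv_equiv track=rewrite | github.com/Viveekk17/CivicSetu | src/_cleanup.py | replace_gradient_vars
-- ===== SOURCE A (Python) =====
-- GRADIENT_VAR_MAP = {
--     'var(--gradient-primary)':   '#14248a',
--     'var(--gradient-secondary)': '#998fc7',
--     'var(--gradient-accent)':    '#14248a',
--     'var(--gradient-warm)':      '#998fc7',
-- }
--
-- def replace_gradient_vars(text):
--     for var, flat in GRADIENT_VAR_MAP.items():
--         # background: 'var(--gradient-*)' -> background: '<flat>'
--         text = text.replace(f"'background': '{var}'", f"'background': '{flat}'")
--         text = text.replace(f'"background": "{var}"', f'"background": "{flat}"')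
--         # style={{ background: 'var(--gradient-primary)' }}
--         text = text.replace(f"background: '{var}'", f"background: '{flat}'")
--         text = text.replace(f'background: "{var}"', f'background: "{flat}"')
--         # background={var}
--         text = text.replace(f'background={{{var}}}', f'background="{flat}"')
--     return text
-- ===== SOURCE B (Python) =====
-- GRADIENT_VAR_MAP = {
--     'var(--gradient-primary)':   '#14248a',
--     'var(--gradient-secondary)': '#998fc7',
--     'var(--gradient-accent)':    '#14248a',
--     'var(--gradient-warm)':      '#998fc7',
-- }
--
-- # (pattern template, replacement template) for the five shapes the cleanup rewrites
-- _SHAPES = [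
--     ("'background': '%s'", "'background': '%s'"),
--     ('"background": "%s"', '"background": "%s"'),
--     ("background: '%s'", "background: '%s'"),
--     ('background: "%s"', 'background: "%s"'),
--     ('background={%s}', 'background="%s"'),
-- ]
--
-- def replace_gradient_vars(text):
--     table = [(po % var, pn % flat)
--              for var, flat in GRADIENT_VAR_MAP.items()
--              for po, pn in _SHAPES]
--     # segment list: replaced text is sealed and never rescanned by later passes
--     segments = [(False, text)]
--     for old, new in table:
--         out = []
--         for sealed, part in segments:
--             if sealed:
--                 out.append((True, part))
--             else:
--                 pieces = part.split(old)
--                 out.append((False, pieces[0]))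
--                 for piece in pieces[1:]:
--                     out.append((True, new))
--                     out.append((False, piece))
--         segments = out
--     return ''.join(part for _, part in segments)
-- ===== Notes on version B (the rewrite author's own statement) =====
-- stated objective: alternative
-- what changed: B keeps the text as a list of (sealed, piece) segments and, for each of the 20 concrete (pattern, replacement) pairs built once from the map, splits only the still-open segments and seals every inserted replacement, so replaced text is never rescanned by later passes, instead of A's 20 sequential whole-string str.replace passes.
import Mathlib
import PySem

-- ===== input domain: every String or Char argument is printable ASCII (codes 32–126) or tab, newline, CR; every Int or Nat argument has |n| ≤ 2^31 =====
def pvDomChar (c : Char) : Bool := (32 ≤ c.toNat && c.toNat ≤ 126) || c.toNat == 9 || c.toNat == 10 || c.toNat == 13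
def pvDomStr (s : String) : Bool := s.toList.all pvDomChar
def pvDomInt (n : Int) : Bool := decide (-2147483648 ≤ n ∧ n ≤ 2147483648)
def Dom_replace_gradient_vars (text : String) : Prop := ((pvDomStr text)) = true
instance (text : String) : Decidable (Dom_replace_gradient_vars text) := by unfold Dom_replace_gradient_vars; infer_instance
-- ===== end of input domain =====

-- B replaces the 20 whole-string replace passes of A by one segment list in which every
-- inserted replacement is sealed and never rescanned (objective: alternative algorithm).

-- ===== PORT A =====
def pvGradientMap : List (String × String) :=
  [("var(--gradient-primary)", "#14248a"),
   ("var(--gradient-secondary)", "#998fc7"),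
   ("var(--gradient-accent)", "#14248a"),
   ("var(--gradient-warm)", "#998fc7")]

def replace_gradient_vars (text : String) : String :=
  pvGradientMap.foldl (fun text vf =>
    let text := PySem.Str.replace text ("'background': '" ++ vf.1 ++ "'") ("'background': '" ++ vf.2 ++ "'")
    let text := PySem.Str.replace text ("\"background\": \"" ++ vf.1 ++ "\"") ("\"background\": \"" ++ vf.2 ++ "\"")
    let text := PySem.Str.replace text ("background: '" ++ vf.1 ++ "'") ("background: '" ++ vf.2 ++ "'")
    let text := PySem.Str.replace text ("background: \"" ++ vf.1 ++ "\"") ("background: \"" ++ vf.2 ++ "\"")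
    let text := PySem.Str.replace text ("background={" ++ vf.1 ++ "}") ("background=\"" ++ vf.2 ++ "\"")
    text) text

-- ===== PORT B =====
-- the comprehension over GRADIENT_VAR_MAP × _SHAPES of Source B ('%s' insertion = concatenation)
def pvTable : List (String × String) :=
  pvGradientMap.flatMap (fun vf =>
    [("'background': '" ++ vf.1 ++ "'", "'background': '" ++ vf.2 ++ "'"),
     ("\"background\": \"" ++ vf.1 ++ "\"", "\"background\": \"" ++ vf.2 ++ "\""),
     ("background: '" ++ vf.1 ++ "'", "background: '" ++ vf.2 ++ "'"),
     ("background: \"" ++ vf.1 ++ "\"", "background: \"" ++ vf.2 ++ "\""),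
     ("background={" ++ vf.1 ++ "}", "background=\"" ++ vf.2 ++ "\"")])

-- one step of Source B's inner loop: append the pieces of one segment to `out`
def pvPassSeg (old new : List Char) (out : List (Bool × List Char)) (seg : Bool × List Char) :
    List (Bool × List Char) :=
  if seg.1 then out ++ [(true, seg.2)]
  else
    match PySem.Chars.splitOn seg.2 old with
    | [] => out
    | p0 :: rest =>
        rest.foldl (fun out pc => out ++ [(true, new), (false, pc)]) (out ++ [(false, p0)])

def replace_gradient_vars_alt (text : String) : String :=
  let segments := [(false, text.toList)]
  let segments := pvTable.foldl
    (fun segs on => segs.foldl (pvPassSeg on.1.toList on.2.toList) []) segments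
  String.ofList (PySem.Chars.join [] (segments.map (·.2)))

-- ===== PRECONDITION & SPEC =====
def pvPats : List (List Char) := pvTable.map (fun pr => pr.1.toList)

-- all strings on which two pattern occurrences overlap on a shared quote character
def pvBadOverlap : List (List Char) :=
  pvPats.flatMap (fun q =>
    pvPats.filterMap (fun P =>
      if (q.getLast? = some '\'' ∨ q.getLast? = some '"') ∧ P.head? = q.getLast?
      then some (q ++ P.tail) else none))

-- a braces pattern whose replacement's closing quote would complete a dict-double pattern
-- of a LATER map entry that A's later pass then rewrites
def pvBadBraces : List (List Char) :=
  (List.range 4).flatMap (fun i =>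
    (List.range 4).filterMap (fun j =>
      if i < j then
        some ((pvTable.getD (5*i+4) ("","")).1.toList ++
              ((pvTable.getD (5*j+1) ("","")).1.toList).tail)
      else none))

def pvBadList : List (List Char) := pvBadOverlap ++ pvBadBraces

-- Pre_ excludes texts in which two gradient-pattern occurrences overlap on a shared quote
-- character (or a replacement's closing quote completes a later pattern occurrence): there
-- which occurrence is rewritten is an artifact of A's fixed replacement order.
def Pre_replace_gradient_vars (text : String) : Prop :=
  pvBadList.all (fun b => !(PySem.Chars.isIn b text.toList)) = true

instance (text : String) : Decidable (Pre_replace_gradient_vars text) := by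
  unfold Pre_replace_gradient_vars; infer_instance

def pvWitness_replace_gradient_vars : String := "background: 'var(--gradient-warm)'"

def Spec_replace_gradient_vars (text : String) (out : String) : Prop :=
  out = replace_gradient_vars_alt text
instance (text : String) (out : String) : Decidable (Spec_replace_gradient_vars text out) := by
  unfold Spec_replace_gradient_vars; infer_instance

-- ===== CLAIM (what is proved, stated in full; the proofs are below) =====
def Claim_equal_replace_gradient_vars : Prop :=
  ∀ (text : String), Dom_replace_gradient_vars text → Pre_replace_gradient_vars text →
    Spec_replace_gradient_vars text (replace_gradient_vars text)

-- ===== LEMMAS AND PROOFS =====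


-- structural versions of Python's str.replace / str.split for a fixed nonempty pattern
def rgRep (p r : List Char) (hp : 0 < p.length) : List Char → List Char
  | [] => []
  | c :: t =>
    if p.isPrefixOf (c :: t) then r ++ rgRep p r hp ((c :: t).drop p.length)
    else c :: rgRep p r hp t
termination_by s => s.length
decreasing_by
  · have := (List.isPrefixOf_iff_prefix.mp (by assumption)).length_le
    simp at this ⊢; omega
  · simp

def rgConsHd (c : Char) : List (List Char) → List (List Char)
  | [] => [[c]]
  | h :: tl => (c :: h) :: tl

def rgSpl (p : List Char) (hp : 0 < p.length) : List Char → List (List Char)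
  | [] => [[]]
  | c :: t =>
    if p.isPrefixOf (c :: t) then [] :: rgSpl p hp ((c :: t).drop p.length)
    else rgConsHd c (rgSpl p hp t)
termination_by s => s.length
decreasing_by
  · have := (List.isPrefixOf_iff_prefix.mp (by assumption)).length_le
    simp at this ⊢; omega
  · simp

theorem rgRep_nil (p r : List Char) (hp : 0 < p.length) : rgRep p r hp [] = [] := by
  rw [rgRep]

theorem rgRep_pos (p r : List Char) (hp : 0 < p.length) (s : List Char)
    (h : p.isPrefixOf s) : rgRep p r hp s = r ++ rgRep p r hp (s.drop p.length) := by
  cases s with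
  | nil =>
    exfalso
    have hpn : p = [] := List.prefix_nil.mp (List.isPrefixOf_iff_prefix.mp h)
    subst hpn; simp at hp
  | cons c t => rw [rgRep]; simp [h]

theorem rgRep_neg (p r : List Char) (hp : 0 < p.length) (c : Char) (t : List Char)
    (h : ¬ p.isPrefixOf (c :: t)) : rgRep p r hp (c :: t) = c :: rgRep p r hp t := by
  rw [rgRep]; simp [h]

theorem rgSpl_nil (p : List Char) (hp : 0 < p.length) : rgSpl p hp [] = [[]] := by
  rw [rgSpl]

theorem rgSpl_pos (p : List Char) (hp : 0 < p.length) (s : List Char)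
    (h : p.isPrefixOf s) : rgSpl p hp s = [] :: rgSpl p hp (s.drop p.length) := by
  cases s with
  | nil =>
    exfalso
    have hpn : p = [] := List.prefix_nil.mp (List.isPrefixOf_iff_prefix.mp h)
    subst hpn; simp at hp
  | cons c t => rw [rgSpl]; simp [h]

theorem rgSpl_neg (p : List Char) (hp : 0 < p.length) (c : Char) (t : List Char)
    (h : ¬ p.isPrefixOf (c :: t)) : rgSpl p hp (c :: t) = rgConsHd c (rgSpl p hp t) := by
  rw [rgSpl]; simp [h]

-- bridge to PySem.Chars.replace
theorem rgRep_go (p r : List Char) (hp : 0 < p.length) :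
    ∀ (fuel : ℕ) (l acc : List Char), l.length ≤ fuel →
      PySem.Chars.replace.go p r fuel l acc = acc.reverse ++ rgRep p r hp l := by
  intro fuel
  induction fuel with
  | zero =>
    intro l acc hl
    have : l = [] := by cases l <;> simp_all
    subst this
    simp [PySem.Chars.replace.go, rgRep_nil]
  | succ n ih =>
    intro l acc hl
    cases l with
    | nil => simp [PySem.Chars.replace.go, rgRep_nil]
    | cons c t =>
      by_cases h : p.isPrefixOf (c :: t)
      · rw [show PySem.Chars.replace.go p r (n+1) (c :: t) acc
            = PySem.Chars.replace.go p r n (List.drop p.length (c :: t)) (r.reverse ++ acc) by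
          simp [PySem.Chars.replace.go, h]]
        rw [ih _ _ (by simp at hl ⊢; omega), rgRep_pos p r hp _ h]
        simp
      · rw [show PySem.Chars.replace.go p r (n+1) (c :: t) acc
            = PySem.Chars.replace.go p r n t (c :: acc) by
          simp [PySem.Chars.replace.go, h]]
        rw [ih _ _ (by simp at hl ⊢; omega), rgRep_neg p r hp _ _ h]
        simp

theorem rgRep_eq_replace (p r : List Char) (hp : 0 < p.length) (s : List Char) :
    PySem.Chars.replace s p r = rgRep p r hp s := by
  have hne : ¬ p.isEmpty := by cases p <;> simp_all
  rw [PySem.Chars.replace, if_neg (by simp_all : ¬ p.isEmpty = true)]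
  exact rgRep_go p r hp s.length s [] (le_refl _)

theorem rgSpl_ne_nil (p : List Char) (hp : 0 < p.length) (s : List Char) :
    rgSpl p hp s ≠ [] := by
  cases s with
  | nil => simp [rgSpl_nil]
  | cons c t =>
    rw [rgSpl]
    split
    · simp
    · cases rgSpl p hp t <;> simp [rgConsHd]


-- bridge to PySem.Chars.splitOn
theorem rgSpl_go (p : List Char) (hp : 0 < p.length) :
    ∀ (fuel : ℕ) (l cur : List Char) (acc : List (List Char)), l.length ≤ fuel →
      PySem.Chars.splitOn.go p fuel l cur acc =
        acc.reverse ++ (match rgSpl p hp l with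
                        | [] => [cur.reverse]
                        | h :: tl => (cur.reverse ++ h) :: tl) := by
  intro fuel
  induction fuel with
  | zero =>
    intro l cur acc hl
    have : l = [] := by cases l <;> simp_all
    subst this
    simp [PySem.Chars.splitOn.go, rgSpl_nil]
  | succ n ih =>
    intro l cur acc hl
    cases l with
    | nil => simp [PySem.Chars.splitOn.go, rgSpl_nil]
    | cons c t =>
      by_cases h : p.isPrefixOf (c :: t)
      · rw [show PySem.Chars.splitOn.go p (n+1) (c :: t) cur acc
            = PySem.Chars.splitOn.go p n (List.drop p.length (c :: t)) [] (cur.reverse :: acc) by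
          simp [PySem.Chars.splitOn.go, h]]
        rw [ih _ _ _ (by simp at hl ⊢; omega), rgSpl_pos p hp _ h]
        cases hs : rgSpl p hp (List.drop p.length (c :: t)) with
        | nil => exact absurd hs (rgSpl_ne_nil p hp _)
        | cons h0 tl => simp
      · rw [show PySem.Chars.splitOn.go p (n+1) (c :: t) cur acc
            = PySem.Chars.splitOn.go p n t (c :: cur) acc by
          simp [PySem.Chars.splitOn.go, h]]
        rw [ih _ _ _ (by simp at hl ⊢; omega), rgSpl_neg p hp _ _ h]
        cases hs : rgSpl p hp t with
        | nil => simp [rgConsHd]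
        | cons h0 tl => simp [rgConsHd]

theorem rgSpl_eq_splitOn (p : List Char) (hp : 0 < p.length) (s : List Char) :
    PySem.Chars.splitOn s p = rgSpl p hp s := by
  rw [PySem.Chars.splitOn]
  rw [rgSpl_go p hp (s.length + 1) s [] [] (by omega)]
  cases hs : rgSpl p hp s with
  | nil => exact absurd hs (rgSpl_ne_nil p hp s)
  | cons h tl => simp
theorem rgInter_cons (sep a : List Char) (l : List (List Char)) (h : l ≠ []) :
    List.intercalate sep (a :: l) = a ++ sep ++ List.intercalate sep l := by
  cases l with
  | nil => simp at h
  | cons b tl => simp [List.intercalate, List.flatten]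

theorem rgInter_single (sep a : List Char) : List.intercalate sep [a] = a := by
  simp [List.intercalate]

theorem rgInter_cons_cons (sep h : List Char) (c : Char) (tl : List (List Char)) :
    List.intercalate sep ((c :: h) :: tl) = c :: List.intercalate sep (h :: tl) := by
  cases tl with
  | nil => simp [rgInter_single]
  | cons b tl' =>
    rw [rgInter_cons sep (c :: h) (b :: tl') (by simp), rgInter_cons sep h (b :: tl') (by simp)]
    simp

theorem rgRep_of_not_infix (p r : List Char) (hp : 0 < p.length) (s : List Char)
    (h : ¬ p <:+: s) : rgRep p r hp s = s := by
  induction s with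
  | nil => exact rgRep_nil p r hp
  | cons c t ih =>
    have hnp : ¬ p.isPrefixOf (c :: t) := by
      intro hpre
      exact h (List.IsPrefix.isInfix (List.isPrefixOf_iff_prefix.mp hpre))
    rw [rgRep_neg p r hp c t hnp, ih (fun hi => h (List.infix_cons hi))]

theorem rgPrefix_drop_eq (p s : List Char) (h : p <+: s) : p ++ s.drop p.length = s := by
  obtain ⟨t, ht⟩ := h
  subst ht; simp

theorem rgSpl_intercalate_id (p : List Char) (hp : 0 < p.length) (s : List Char) :
    List.intercalate p (rgSpl p hp s) = s := by
  induction s using rgSpl.induct p hp with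
  | case1 => simp [rgSpl_nil, rgInter_single]
  | case2 c t h ih =>
    rw [rgSpl_pos p hp _ h, rgInter_cons _ _ _ (rgSpl_ne_nil p hp _), ih]
    simpa using rgPrefix_drop_eq p (c :: t) (List.isPrefixOf_iff_prefix.mp h)
  | case3 c t h ih =>
    rw [rgSpl_neg p hp c t h]
    cases hs : rgSpl p hp t with
    | nil => exact absurd hs (rgSpl_ne_nil p hp t)
    | cons h0 tl =>
      rw [hs] at ih
      simp [rgConsHd, rgInter_cons_cons, ih]

theorem rgRep_intercalate (p r : List Char) (hp : 0 < p.length) (s : List Char) :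
    rgRep p r hp s = List.intercalate r (rgSpl p hp s) := by
  induction s using rgSpl.induct p hp with
  | case1 => simp [rgSpl_nil, rgRep_nil, rgInter_single]
  | case2 c t h ih =>
    rw [rgRep_pos p r hp _ h, rgSpl_pos p hp _ h,
        rgInter_cons _ _ _ (rgSpl_ne_nil p hp _), ih]
    simp
  | case3 c t h ih =>
    rw [rgRep_neg p r hp c t h, rgSpl_neg p hp c t h]
    cases hs : rgSpl p hp t with
    | nil => exact absurd hs (rgSpl_ne_nil p hp t)
    | cons h0 tl =>
      rw [hs] at ih
      simp [rgConsHd, rgInter_cons_cons, ih]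

-- distribution of rgRep over an append with no straddling occurrence
theorem rgRep_dist (p r : List Char) (hp : 0 < p.length) :
    ∀ (u v : List Char),
      (∀ d, 0 < d → d < p.length → ¬ (p.take d <:+ u ∧ p.drop d <+: v)) →
      rgRep p r hp (u ++ v) = rgRep p r hp u ++ rgRep p r hp v := by
  intro u
  induction u using rgSpl.induct p hp with
  | case1 => intro v _; simp [rgRep_nil]
  | case2 c t h ih =>
    intro v hstr
    have hpre : p <+: (c :: t) := List.isPrefixOf_iff_prefix.mp h
    have hpre' : p.isPrefixOf ((c :: t) ++ v) := by
      rw [List.isPrefixOf_iff_prefix]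
      exact hpre.trans (List.prefix_append _ _)
    rw [rgRep_pos p r hp _ hpre', rgRep_pos p r hp _ h]
    have hdrop : ((c :: t) ++ v).drop p.length = (c :: t).drop p.length ++ v := by
      rw [List.drop_append_of_le_length hpre.length_le]
    rw [hdrop, ih _ (by
      intro d hd1 hd2 ⟨hsuf, hprefv⟩
      exact hstr d hd1 hd2 ⟨hsuf.trans (by
        obtain ⟨w, hw⟩ := hpre
        exact ⟨p, by rw [← hw]; simp⟩), hprefv⟩)]
    simp
  | case3 c t h ih =>
    intro v hstr
    by_cases hcv : p.isPrefixOf ((c :: t) ++ v)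
    · exfalso
      have hcvp : p <+: (c :: t) ++ v := List.isPrefixOf_iff_prefix.mp hcv
      by_cases hlen : p.length ≤ (c :: t).length
      · exact h (List.isPrefixOf_iff_prefix.mpr ((List.isPrefix_append_of_length hlen).mp hcvp))
      · -- (c :: t) <+: p : straddle with d = (c :: t).length
        rw [not_le] at hlen
        have hup : (c :: t) <+: p :=
          List.prefix_of_prefix_length_le (List.prefix_append _ _) hcvp (by omega)
        have htake : p.take (c :: t).length = c :: t := by
          obtain ⟨w, hw⟩ := hup
          rw [← hw]; simp
        have hdropv : p.drop (c :: t).length <+: v := by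
          obtain ⟨w, hw⟩ := hcvp
          have h2 : p.drop (c :: t).length ++ w = v := by
            have h3 := congrArg (List.drop (c :: t).length) hw
            rw [List.drop_append_of_le_length (by omega : (c :: t).length ≤ p.length)] at h3
            simpa using h3
          exact ⟨w, h2⟩
        refine hstr (c :: t).length (by simp) hlen ⟨?_, hdropv⟩
        rw [htake]
    · rw [show ((c :: t) ++ v) = c :: (t ++ v) by simp]
      rw [rgRep_neg p r hp _ _ (by simpa using hcv), rgRep_neg p r hp _ _ h]
      rw [ih _ (by
        intro d hd1 hd2 ⟨hsuf, hprefv⟩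
        exact hstr d hd1 hd2 ⟨hsuf.trans (List.suffix_cons _ _), hprefv⟩)]
      simp
def rgT : List (List Char × List Char) := pvTable.map (fun pr => (pr.1.toList, pr.2.toList))
def rgPat (k : ℕ) : List Char := (rgT.getD k ([], [])).1
def rgRepl (k : ℕ) : List Char := (rgT.getD k ([], [])).2

def chkLen : Bool := (List.range 20).all fun a => (0 < (rgPat a).length) && (0 < (rgRepl a).length)
def chkNoInfix : Bool := (List.range 20).all fun a => (List.range 20).all fun b =>
  !(PySem.Chars.isIn (rgPat a) (rgRepl b)) && !(PySem.Chars.isIn (rgRepl b) (rgPat a))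
def chkDropPre : Bool := (List.range 20).all fun a => (List.range 20).all fun b =>
  (List.range (rgPat a).length).all fun d =>
    decide (d = 0) || decide ((rgPat a).length - 1 ≤ d) || !((rgPat a).drop d).isPrefixOf (rgRepl b)
def chkTakeSuf : Bool := (List.range 20).all fun a => (List.range 20).all fun b =>
  (List.range (rgPat a).length).all fun d =>
    decide (d < 2) || !((rgPat a).take d).isSuffixOf (rgRepl b)
def chkHeadEq : Bool := (List.range 20).all fun a => (rgPat a).head? == (rgRepl a).head?
def chkQuote1 : Bool := (List.range 20).all fun a => (List.range 20).all fun b =>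
  !((rgPat a).getLast? == (rgRepl b).head?) ||
  ((rgPat a).getLast? == some '\'') || ((rgPat a).getLast? == some '"')
def chkSeal : Bool := (List.range 20).all fun a => (List.range 20).all fun b =>
  !((rgRepl a).getLast? == (rgPat b).head?) ||
  (((rgPat a).getLast? == (rgRepl a).getLast?) &&
    (((rgPat a).getLast? == some '\'') || ((rgPat a).getLast? == some '"'))) ||
  (((rgPat a).getLast? == some '}') && ((rgPat b).head? == some '"') &&
    decide (a % 5 = 4) && decide (b % 5 = 1))
def chkPatMem : Bool := (List.range 20).all fun a => pvPats.contains (rgPat a)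
def chkPatTab : Bool := (List.range 20).all fun m =>
  rgPat m == (pvTable.getD m ("", "")).1.toList

theorem chkLen_t : chkLen = true := by decide
theorem chkNoInfix_t : chkNoInfix = true := by decide
theorem chkDropPre_t : chkDropPre = true := by decide
theorem chkTakeSuf_t : chkTakeSuf = true := by decide
theorem chkHeadEq_t : chkHeadEq = true := by decide
theorem chkQuote1_t : chkQuote1 = true := by decide
theorem chkSeal_t : chkSeal = true := by decide
theorem chkPatMem_t : chkPatMem = true := by decide
theorem chkPatTab_t : chkPatTab = true := by decide
theorem rgT_len : rgT.length = 20 := by decide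

-- Prop wrappers for the decided facts
theorem factLen (a : ℕ) (ha : a < 20) : 0 < (rgPat a).length ∧ 0 < (rgRepl a).length := by
  have h := chkLen_t
  unfold chkLen at h
  rw [List.all_eq_true] at h
  have := h a (by simpa using ha)
  simpa using this

theorem factNoInfix (a b : ℕ) (ha : a < 20) (hb : b < 20) :
    ¬ (rgPat a <:+: rgRepl b) ∧ ¬ (rgRepl b <:+: rgPat a) := by
  have h := chkNoInfix_t
  unfold chkNoInfix at h
  rw [List.all_eq_true] at h
  have h1 := h a (by simpa using ha)
  rw [List.all_eq_true] at h1
  have h2 := h1 b (by simpa using hb)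
  simpa [PySem.Chars.isIn_eq_false_iff] using h2

theorem factDropPre (a b d : ℕ) (ha : a < 20) (hb : b < 20)
    (h0 : 0 < d) (h1 : d < (rgPat a).length - 1) :
    ¬ ((rgPat a).drop d <+: rgRepl b) := by
  have h := chkDropPre_t
  unfold chkDropPre at h
  rw [List.all_eq_true] at h
  have h2 := h a (by simpa using ha)
  rw [List.all_eq_true] at h2
  have h3 := h2 b (by simpa using hb)
  rw [List.all_eq_true] at h3
  have h4 := h3 d (by simp; omega)
  intro contra
  have hc : ((rgPat a).drop d).isPrefixOf (rgRepl b) = true :=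
    List.isPrefixOf_iff_prefix.mpr contra
  have hd0 : decide (d = 0) = false := by simp; omega
  have hd1 : decide ((rgPat a).length - 1 ≤ d) = false := by simp; omega
  rw [hd0, hd1, hc] at h4
  simp at h4

theorem factTakeSuf (a b d : ℕ) (ha : a < 20) (hb : b < 20)
    (h0 : 2 ≤ d) (h1 : d < (rgPat a).length) :
    ¬ ((rgPat a).take d <:+ rgRepl b) := by
  have h := chkTakeSuf_t
  unfold chkTakeSuf at h
  rw [List.all_eq_true] at h
  have h2 := h a (by simpa using ha)
  rw [List.all_eq_true] at h2
  have h3 := h2 b (by simpa using hb)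
  rw [List.all_eq_true] at h3
  have h4 := h3 d (by simpa using h1)
  intro contra
  have hc : ((rgPat a).take d).isSuffixOf (rgRepl b) = true :=
    List.isSuffixOf_iff_suffix.mpr contra
  have hd0 : decide (d < 2) = false := by simp; omega
  rw [hd0, hc] at h4
  simp at h4

theorem factHeadEq (a : ℕ) (ha : a < 20) : (rgPat a).head? = (rgRepl a).head? := by
  have h := chkHeadEq_t
  unfold chkHeadEq at h
  rw [List.all_eq_true] at h
  have := h a (by simpa using ha)
  simpa using this

theorem factQuote1 (a b : ℕ) (ha : a < 20) (hb : b < 20)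
    (hm : (rgPat a).getLast? = (rgRepl b).head?) :
    (rgPat a).getLast? = some '\'' ∨ (rgPat a).getLast? = some '"' := by
  have h := chkQuote1_t
  unfold chkQuote1 at h
  rw [List.all_eq_true] at h
  have h1 := h a (by simpa using ha)
  rw [List.all_eq_true] at h1
  have h2 := h1 b (by simpa using hb)
  have hmb : ((rgPat a).getLast? == (rgRepl b).head?) = true := by
    simpa using hm
  rw [hmb] at h2
  simp at h2
  rcases h2 with h2 | h2
  · exact Or.inl h2
  · exact Or.inr h2

theorem factSeal (a b : ℕ) (ha : a < 20) (hb : b < 20)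
    (hm : (rgRepl a).getLast? = (rgPat b).head?) :
    ((rgPat a).getLast? = (rgRepl a).getLast? ∧
      ((rgPat a).getLast? = some '\'' ∨ (rgPat a).getLast? = some '"')) ∨
    ((rgPat a).getLast? = some '}' ∧ (rgPat b).head? = some '"' ∧ a % 5 = 4 ∧ b % 5 = 1) := by
  have h := chkSeal_t
  unfold chkSeal at h
  rw [List.all_eq_true] at h
  have h1 := h a (by simpa using ha)
  rw [List.all_eq_true] at h1
  have h2 := h1 b (by simpa using hb)
  have hmb : ((rgRepl a).getLast? == (rgPat b).head?) = true := by
    simpa using hm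
  rw [hmb] at h2
  simp at h2
  rcases h2 with h2 | h2
  · exact Or.inl h2
  · exact Or.inr ⟨h2.1.1.1, h2.1.1.2, h2.1.2, h2.2⟩

theorem factPatMem (a : ℕ) (ha : a < 20) : rgPat a ∈ pvPats := by
  have h := chkPatMem_t
  unfold chkPatMem at h
  rw [List.all_eq_true] at h
  have := h a (by simpa using ha)
  simpa using this

theorem factPatTab (m : ℕ) (hm : m < 20) :
    rgPat m = (pvTable.getD m ("", "")).1.toList := by
  have h := chkPatTab_t
  unfold chkPatTab at h
  rw [List.all_eq_true] at h
  have := h m (by simpa using hm)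
  simpa using this

-- ghost pair state: list of (open text, seal index) pairs plus trailing open text
def rgRenderP (prs : List (List Char × ℕ)) : List Char :=
  prs.flatMap (fun ck => ck.1 ++ rgRepl ck.2)
def rgRender (st : List (List Char × ℕ) × List Char) : List Char := rgRenderP st.1 ++ st.2
def rgShadowP (prs : List (List Char × ℕ)) : List Char :=
  prs.flatMap (fun ck => ck.1 ++ rgPat ck.2)
def rgShadow (st : List (List Char × ℕ) × List Char) : List Char := rgShadowP st.1 ++ st.2

def rgExp (j k : ℕ) : List (List Char) → List (List Char × ℕ)
  | [] => []
  | [q] => [(q, k)]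
  | q :: q' :: rest => (q, j) :: rgExp j k (q' :: rest)

def rgFin (j : ℕ) : List (List Char) → List (List Char × ℕ) × List Char
  | [] => ([], [])
  | [q] => ([], q)
  | q :: q' :: rest =>
      let pr := rgFin j (q' :: rest)
      ((q, j) :: pr.1, pr.2)

def rgPass (j : ℕ) (p : List Char) (hp : 0 < p.length)
    (st : List (List Char × ℕ) × List Char) : List (List Char × ℕ) × List Char :=
  (st.1.flatMap (fun ck => rgExp j ck.2 (rgSpl p hp ck.1)) ++ (rgFin j (rgSpl p hp st.2)).1,
   (rgFin j (rgSpl p hp st.2)).2)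

def rgEraseP (prs : List (List Char × ℕ)) : List (Bool × List Char) :=
  prs.flatMap (fun ck => [(false, ck.1), (true, rgRepl ck.2)])
def rgEraseSt (st : List (List Char × ℕ) × List Char) : List (Bool × List Char) :=
  rgEraseP st.1 ++ [(false, st.2)]

def rgSealBound (n : ℕ) (st : List (List Char × ℕ) × List Char) : Prop :=
  ∀ ck ∈ st.1, ck.2 < n
def rgPreC (s : List Char) : Prop := ∀ b ∈ pvBadList, ¬ b <:+: s

-- rendering / shadow of expansions
theorem rgRenderP_exp (j k : ℕ) (ps : List (List Char)) (h : ps ≠ []) :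
    rgRenderP (rgExp j k ps) = List.intercalate (rgRepl j) ps ++ rgRepl k := by
  induction ps with
  | nil => simp at h
  | cons q rest ih =>
    cases rest with
    | nil => simp [rgExp, rgRenderP, rgInter_single]
    | cons q' rest' =>
      rw [rgExp, rgInter_cons _ _ _ (by simp)]
      have := ih (by simp)
      simp only [rgRenderP, List.flatMap_cons] at this ⊢
      rw [this]
      simp

theorem rgShadowP_exp (j k : ℕ) (ps : List (List Char)) (h : ps ≠ []) :
    rgShadowP (rgExp j k ps) = List.intercalate (rgPat j) ps ++ rgPat k := by
  induction ps with
  | nil => simp at h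
  | cons q rest ih =>
    cases rest with
    | nil => simp [rgExp, rgShadowP, rgInter_single]
    | cons q' rest' =>
      rw [rgExp, rgInter_cons _ _ _ (by simp)]
      have := ih (by simp)
      simp only [rgShadowP, List.flatMap_cons] at this ⊢
      rw [this]
      simp

theorem rgFin_render (j : ℕ) (ps : List (List Char)) (h : ps ≠ []) :
    rgRenderP (rgFin j ps).1 ++ (rgFin j ps).2 = List.intercalate (rgRepl j) ps := by
  induction ps with
  | nil => simp at h
  | cons q rest ih =>
    cases rest with
    | nil => simp [rgFin, rgRenderP, rgInter_single]
    | cons q' rest' =>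
      rw [rgFin, rgInter_cons _ _ _ (by simp)]
      have := ih (by simp)
      simp only [rgRenderP, List.flatMap_cons] at this ⊢
      rw [← this]
      simp

theorem rgFin_shadow (j : ℕ) (ps : List (List Char)) (h : ps ≠ []) :
    rgShadowP (rgFin j ps).1 ++ (rgFin j ps).2 = List.intercalate (rgPat j) ps := by
  induction ps with
  | nil => simp at h
  | cons q rest ih =>
    cases rest with
    | nil => simp [rgFin, rgShadowP, rgInter_single]
    | cons q' rest' =>
      rw [rgFin, rgInter_cons _ _ _ (by simp)]
      have := ih (by simp)
      simp only [rgShadowP, List.flatMap_cons] at this ⊢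
      rw [← this]
      simp

theorem rgShadowP_append (a b : List (List Char × ℕ)) :
    rgShadowP (a ++ b) = rgShadowP a ++ rgShadowP b := by simp [rgShadowP]
theorem rgShadowP_cons (ck : List Char × ℕ) (l : List (List Char × ℕ)) :
    rgShadowP (ck :: l) = ck.1 ++ rgPat ck.2 ++ rgShadowP l := by simp [rgShadowP]
theorem rgRenderP_append (a b : List (List Char × ℕ)) :
    rgRenderP (a ++ b) = rgRenderP a ++ rgRenderP b := by simp [rgRenderP]
theorem rgRenderP_cons (ck : List Char × ℕ) (l : List (List Char × ℕ)) :
    rgRenderP (ck :: l) = ck.1 ++ rgRepl ck.2 ++ rgRenderP l := by simp [rgRenderP]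

theorem rgShadowP_passP (j : ℕ) (p : List Char) (hp : 0 < p.length) (hpj : p = rgPat j)
    (prs : List (List Char × ℕ)) :
    rgShadowP (prs.flatMap (fun ck => rgExp j ck.2 (rgSpl p hp ck.1))) = rgShadowP prs := by
  induction prs with
  | nil => simp [rgShadowP]
  | cons ck rest ih =>
    rw [List.flatMap_cons, rgShadowP_append, ih, rgShadowP_cons,
        rgShadowP_exp j ck.2 _ (rgSpl_ne_nil _ hp ck.1), ← hpj, rgSpl_intercalate_id]

-- shadow is preserved by a ghost pass
theorem rgShadow_pass (j : ℕ) (p : List Char) (hp : 0 < p.length) (hpj : p = rgPat j)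
    (st : List (List Char × ℕ) × List Char) :
    rgShadow (rgPass j p hp st) = rgShadow st := by
  obtain ⟨prs, fin⟩ := st
  simp only [rgPass, rgShadow, rgShadowP_append]
  rw [rgShadowP_passP j p hp hpj]
  have hfin : rgShadowP (rgFin j (rgSpl p hp fin)).1 ++ (rgFin j (rgSpl p hp fin)).2 = fin := by
    rw [rgFin_shadow j _ (rgSpl_ne_nil _ hp fin), ← hpj, rgSpl_intercalate_id]
  simp only [List.append_assoc]
  rw [hfin]

theorem rgSealBound_mem_exp (j k : ℕ) (ps : List (List Char)) :
    ∀ ck ∈ rgExp j k ps, ck.2 = j ∨ ck.2 = k := by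
  induction ps with
  | nil => simp [rgExp]
  | cons q rest ih =>
    cases rest with
    | nil => simp [rgExp]
    | cons q' rest' =>
      intro ck hck
      rw [rgExp] at hck
      rcases List.mem_cons.mp hck with h | h
      · left; rw [h]
      · exact ih ck h

theorem rgSealBound_mem_fin (j : ℕ) (ps : List (List Char)) :
    ∀ ck ∈ (rgFin j ps).1, ck.2 = j := by
  induction ps with
  | nil => simp [rgFin]
  | cons q rest ih =>
    cases rest with
    | nil => simp [rgFin]
    | cons q' rest' =>
      intro ck hck
      rw [rgFin] at hck
      rcases List.mem_cons.mp hck with h | h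
      · rw [h]
      · exact ih ck h

theorem rgSealBound_pass (n : ℕ) (p : List Char) (hp : 0 < p.length)
    (st : List (List Char × ℕ) × List Char) (hb : rgSealBound n st) :
    rgSealBound (n + 1) (rgPass n p hp st) := by
  intro ck hck
  simp only [rgPass] at hck
  rcases List.mem_append.mp hck with h | h
  · rw [List.mem_flatMap] at h
    obtain ⟨ck', hck', hmem⟩ := h
    rcases rgSealBound_mem_exp n ck'.2 _ ck hmem with h | h
    · omega
    · have := hb ck' hck'; omega
  · have := rgSealBound_mem_fin n _ ck h; omega
-- interleaved erased pieces of one split-open segment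
def rgIL (new : List Char) : List (List Char) → List (Bool × List Char)
  | [] => []
  | p0 :: rest => (false, p0) :: rest.flatMap (fun pc => [(true, new), (false, pc)])

theorem rgIL_cons2 (new q q' : List Char) (rest : List (List Char)) :
    rgIL new (q :: q' :: rest) = (false, q) :: (true, new) :: rgIL new (q' :: rest) := by
  simp [rgIL]

theorem rgPassSeg_eq (old new : List Char) (out : List (Bool × List Char))
    (seg : Bool × List Char) :
    pvPassSeg old new out seg = out ++
      (if seg.1 then [(true, seg.2)] else rgIL new (PySem.Chars.splitOn seg.2 old)) := by
  unfold pvPassSeg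
  by_cases hs : seg.1
  · simp [hs]
  · simp only [hs, if_false, Bool.false_eq_true]
    cases hsp : PySem.Chars.splitOn seg.2 old with
    | nil => simp [rgIL]
    | cons p0 rest =>
      show List.foldl (fun out pc => out ++ [(true, new), (false, pc)])
            (out ++ [(false, p0)]) rest = out ++ rgIL new (p0 :: rest)
      rw [PySem.List.foldl_append_eq_flatMap (fun pc => [(true, new), (false, pc)]) rest]
      simp [rgIL]

theorem rgFold_pass (old new : List Char) (segs : List (Bool × List Char)) :
    segs.foldl (pvPassSeg old new) [] =
      segs.flatMap (fun seg => if seg.1 then [(true, seg.2)]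
                               else rgIL new (PySem.Chars.splitOn seg.2 old)) := by
  have hfun : pvPassSeg old new = (fun out seg => out ++
      (if seg.1 then [(true, seg.2)] else rgIL new (PySem.Chars.splitOn seg.2 old))) := by
    funext out seg; exact rgPassSeg_eq old new out seg
  rw [hfun, PySem.List.foldl_append_eq_flatMap]
  simp

theorem rgEraseP_append (a b : List (List Char × ℕ)) :
    rgEraseP (a ++ b) = rgEraseP a ++ rgEraseP b := by simp [rgEraseP]

theorem rgIL_exp (j k : ℕ) (ps : List (List Char)) (h : ps ≠ []) :
    rgIL (rgRepl j) ps ++ [(true, rgRepl k)] = rgEraseP (rgExp j k ps) := by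
  induction ps with
  | nil => simp at h
  | cons q rest ih =>
    cases rest with
    | nil => simp [rgIL, rgExp, rgEraseP]
    | cons q' rest' =>
      rw [rgIL_cons2, rgExp]
      have := ih (by simp)
      simp only [rgEraseP, List.flatMap_cons] at this ⊢
      rw [← this]
      simp

theorem rgIL_fin (j : ℕ) (ps : List (List Char)) (h : ps ≠ []) :
    rgIL (rgRepl j) ps = rgEraseP (rgFin j ps).1 ++ [(false, (rgFin j ps).2)] := by
  induction ps with
  | nil => simp at h
  | cons q rest ih =>
    cases rest with
    | nil => simp [rgIL, rgFin, rgEraseP]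
    | cons q' rest' =>
      rw [rgIL_cons2, rgFin]
      have := ih (by simp)
      simp only [rgEraseP, List.flatMap_cons] at this ⊢
      rw [this]
      simp

theorem rgErase_pass (j : ℕ) (p : List Char) (hp : 0 < p.length)
    (st : List (List Char × ℕ) × List Char) :
    (rgEraseSt st).foldl (pvPassSeg p (rgRepl j)) [] = rgEraseSt (rgPass j p hp st) := by
  rw [rgFold_pass]
  obtain ⟨prs, fin⟩ := st
  unfold rgEraseSt
  rw [List.flatMap_append]
  have hopen : ∀ cs : List Char,
      (if (false, cs).1 then [(true, (false, cs).2)]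
       else rgIL (rgRepl j) (PySem.Chars.splitOn (false, cs).2 p)) =
      rgIL (rgRepl j) (rgSpl p hp cs) := by
    intro cs; simp [rgSpl_eq_splitOn p hp]
  have h1 : (rgEraseP prs).flatMap (fun seg => if seg.1 then [(true, seg.2)]
              else rgIL (rgRepl j) (PySem.Chars.splitOn seg.2 p)) =
            rgEraseP (prs.flatMap (fun ck => rgExp j ck.2 (rgSpl p hp ck.1))) := by
    induction prs with
    | nil => simp [rgEraseP]
    | cons ck rest ih =>
      rw [show rgEraseP (ck :: rest) = [(false, ck.1), (true, rgRepl ck.2)] ++ rgEraseP rest by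
            simp [rgEraseP]]
      rw [List.flatMap_append, ih]
      rw [show List.flatMap (fun ck => rgExp j ck.2 (rgSpl p hp ck.1)) (ck :: rest) =
            rgExp j ck.2 (rgSpl p hp ck.1) ++
              List.flatMap (fun ck => rgExp j ck.2 (rgSpl p hp ck.1)) rest by simp]
      rw [rgEraseP_append]
      congr 1
      rw [show List.flatMap (fun seg => if seg.1 then [(true, seg.2)]
              else rgIL (rgRepl j) (PySem.Chars.splitOn seg.2 p))
            [(false, ck.1), (true, rgRepl ck.2)] =
            rgIL (rgRepl j) (rgSpl p hp ck.1) ++ [(true, rgRepl ck.2)] by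
        simp [rgSpl_eq_splitOn p hp]]
      exact rgIL_exp j ck.2 _ (rgSpl_ne_nil _ hp ck.1)
  have h2 : List.flatMap (fun seg => if seg.1 then [(true, seg.2)]
              else rgIL (rgRepl j) (PySem.Chars.splitOn seg.2 p)) [(false, fin)] =
            rgEraseP (rgFin j (rgSpl p hp fin)).1 ++ [(false, (rgFin j (rgSpl p hp fin)).2)] := by
    simp only [List.flatMap_cons, List.flatMap_nil, List.append_nil]
    rw [hopen fin, rgIL_fin j _ (rgSpl_ne_nil _ hp fin)]
  rw [h1, h2, rgPass]
  simp [rgEraseP_append]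

-- prefix/suffix helpers
theorem rgPrefix_cases (x a b : List Char) (h : x <+: a ++ b) : x <+: a ∨ a <+: x := by
  by_cases hl : x.length ≤ a.length
  · exact Or.inl ((List.isPrefix_append_of_length hl).mp h)
  · exact Or.inr (List.prefix_of_prefix_length_le (List.prefix_append a b) h (by omega))

theorem rgPrefix_peel (x a b : List Char) (h : x <+: a ++ b) (ha : a <+: x) :
    x.drop a.length <+: b := by
  obtain ⟨y, hy⟩ := ha
  obtain ⟨w, hw⟩ := h
  refine ⟨w, ?_⟩
  rw [← hy]
  simp only [List.drop_left]
  rw [← hy, List.append_assoc] at hw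
  exact List.append_cancel_left hw

theorem rgSuffix_append_right (a c b : List Char) (h : a <:+ c) : a ++ b <:+ c ++ b := by
  obtain ⟨w, hw⟩ := h
  exact ⟨w, by rw [← hw]; simp⟩

theorem rgDropLast_append (a b : List Char) (ha : a ≠ []) (h : a.getLast? = b.head?) :
    a ++ b.tail = a.dropLast ++ b := by
  cases b with
  | nil =>
    simp at h
    exact absurd h ha
  | cons c bt =>
    have hg : a.getLast ha = c := by
      have h2 := List.getLast?_eq_some_getLast ha
      rw [h2] at h; simpa using h
    conv_rhs => rw [show a.dropLast ++ (c :: bt) = a.dropLast ++ [c] ++ bt by simp]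
    rw [← hg, List.dropLast_append_getLast ha]
    simp

-- membership in the bad-literal list
theorem rgMem1 (q P : List Char) (hq : q ∈ pvPats) (hP : P ∈ pvPats)
    (hquote : q.getLast? = some '\'' ∨ q.getLast? = some '"') (hmatch : P.head? = q.getLast?) :
    (q ++ P.tail) ∈ pvBadList := by
  unfold pvBadList
  apply List.mem_append_left
  unfold pvBadOverlap
  rw [List.mem_flatMap]
  refine ⟨q, hq, ?_⟩
  rw [List.mem_filterMap]
  exact ⟨P, hP, by rw [if_pos ⟨hquote, hmatch⟩]⟩

theorem rgMem2 (i j : ℕ) (hij : i < j) (hj : j < 4) :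
    ((pvTable.getD (5*i+4) ("","")).1.toList ++
     ((pvTable.getD (5*j+1) ("","")).1.toList).tail) ∈ pvBadList := by
  unfold pvBadList
  apply List.mem_append_right
  unfold pvBadBraces
  rw [List.mem_flatMap]
  refine ⟨i, by simp [List.mem_range]; omega, ?_⟩
  rw [List.mem_filterMap]
  exact ⟨j, by simpa using hj, by rw [if_pos hij]⟩

theorem rgPreC_infix (s s' : List Char) (h : rgPreC s) (hinf : s' <:+: s) : rgPreC s' :=
  fun b hb hbs => h b hb (hbs.trans hinf)
-- small helpers
theorem rgPrefix_congr (a b c : List Char) (h : b <+: c) : a ++ b <+: a ++ c := by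
  obtain ⟨w, hw⟩ := h
  exact ⟨w, by rw [← hw]; simp⟩

theorem rgDrop_last (l : List Char) (h : l ≠ []) : l.drop (l.length - 1) = [l.getLast h] := by
  have h1 : l.dropLast ++ [l.getLast h] = l := List.dropLast_append_getLast h
  have h2 : l.length - 1 = l.dropLast.length := by simp
  have h3 : List.drop l.dropLast.length (l.dropLast ++ [l.getLast h]) = [l.getLast h] :=
    List.drop_left
  rw [h1] at h3
  rw [h2]
  exact h3

theorem rgSuffix_singleton (c : Char) (l : List Char) (h : [c] <:+ l) : l.getLast? = some c := by
  obtain ⟨w, hw⟩ := h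
  rw [← hw]
  simp

theorem rgPrefix_singleton (c : Char) (l : List Char) (h : [c] <+: l) : l.head? = some c := by
  obtain ⟨w, hw⟩ := h
  rw [← hw]
  simp

theorem rgTake1 (l : List Char) (h : l ≠ []) : l.take 1 = [l.head h] := by
  cases l with
  | nil => exact absurd rfl h
  | cons c t => simp

-- the bad literal produced when a sealed replacement's closing quote would
-- complete an occurrence of the current pattern
theorem rgBadSeal (n k : ℕ) (hn : n < 20) (hk20 : k < 20) (hkn : k < n)
    (hm : (rgRepl k).getLast? = (rgPat n).head?) :
    (rgPat k ++ (rgPat n).tail) ∈ pvBadList := by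
  rcases factSeal k n hk20 hn hm with ⟨heq, hquote⟩ | ⟨hbr, hdd, hk5, hn5⟩
  · exact rgMem1 (rgPat k) (rgPat n) (factPatMem k hk20) (factPatMem n hn) hquote
      (by rw [heq, hm])
  · have e1 : rgPat k = (pvTable.getD (5*(k/5)+4) ("","")).1.toList := by
      rw [show 5*(k/5)+4 = k by omega]
      exact factPatTab k hk20
    have e2 : rgPat n = (pvTable.getD (5*(n/5)+1) ("","")).1.toList := by
      rw [show 5*(n/5)+1 = n by omega]
      exact factPatTab n hn
    rw [e1, e2]
    exact rgMem2 (k/5) (n/5) (by omega) (by omega)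

-- no occurrence of the current pattern can straddle the boundary between an open
-- segment and the sealed replacement that follows it
theorem rgSafe1 (n k : ℕ) (hn : n < 20) (hk20 : k < 20)
    (cs S v : List Char)
    (hinf : cs ++ rgPat k <:+: S) (hpre : rgPreC S) :
    ∀ d, 0 < d → d < (rgPat n).length →
      ¬ ((rgPat n).take d <:+ cs ∧ (rgPat n).drop d <+: rgRepl k ++ v) := by
  intro d hd0 hdlen hand
  obtain ⟨htk, hdr⟩ := hand
  have hpursue := factLen n hn
  have hpne : rgPat n ≠ [] := by
    intro h0; rw [h0] at hpursue; simp at hpursue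
  rcases rgPrefix_cases _ _ _ hdr with hA | hB
  · by_cases hsmall : d < (rgPat n).length - 1
    · exact factDropPre n k d hn hk20 hd0 hsmall hA
    · have hd : d = (rgPat n).length - 1 := by omega
      rw [hd, rgDrop_last _ hpne] at hA
      have hrk : (rgRepl k).head? = some ((rgPat n).getLast hpne) := rgPrefix_singleton _ _ hA
      have hql : (rgPat n).getLast? = (rgRepl k).head? := by
        rw [hrk, List.getLast?_eq_some_getLast hpne]
      have hquote := factQuote1 n k hn hk20 hql
      have hmatch : (rgPat k).head? = (rgPat n).getLast? := by
        rw [hql, factHeadEq k hk20]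
      have hmem := rgMem1 (rgPat n) (rgPat k) (factPatMem n hn) (factPatMem k hk20) hquote hmatch
      have hdla : (rgPat n) ++ (rgPat k).tail = (rgPat n).dropLast ++ rgPat k :=
        rgDropLast_append _ _ hpne hmatch.symm
      rw [hd, ← List.dropLast_eq_take] at htk
      have hemb : (rgPat n).dropLast ++ rgPat k <:+ cs ++ rgPat k :=
        rgSuffix_append_right _ _ _ htk
      exact hpre _ hmem (hdla ▸ (hemb.isInfix.trans hinf))
  · exact (factNoInfix n k hn hk20).2 (hB.isInfix.trans (List.drop_suffix d (rgPat n)).isInfix)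

-- no occurrence of the current pattern can straddle the boundary at the start of a
-- sealed replacement (using its closing-quote only): refuted through the bad literals
theorem rgSafe2 (n k : ℕ) (hn : n < 20) (hk20 : k < 20) (hkn : k < n)
    (rest : List (List Char × ℕ)) (hrest : ∀ ck ∈ rest, ck.2 < n)
    (fin S : List Char)
    (hinf : rgPat k ++ (rgShadowP rest ++ fin) <:+: S)
    (hpre : rgPreC S) :
    ∀ d, 0 < d → d < (rgPat n).length →
      ¬ ((rgPat n).take d <:+ rgRepl k ∧ (rgPat n).drop d <+: rgRenderP rest ++ fin) := by
  intro d hd0 hdlen hand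
  obtain ⟨htk, hdr⟩ := hand
  have hplen := factLen n hn
  have hpne : rgPat n ≠ [] := by
    intro h0; rw [h0] at hplen; simp at hplen
  by_cases hd2 : 2 ≤ d
  · exact factTakeSuf n k d hn hk20 hd2 hdlen htk
  · have hd1 : d = 1 := by omega
    subst hd1
    rw [rgTake1 _ hpne] at htk
    have hm : (rgRepl k).getLast? = (rgPat n).head? := by
      rw [rgSuffix_singleton _ _ htk, List.head?_eq_some_head]
    have hmem := rgBadSeal n k hn hk20 hkn hm
    -- now refute (rgPat n).tail <+: rgRenderP rest ++ fin
    rw [show (rgPat n).drop 1 = (rgPat n).tail by simp] at hdr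
    have hfalse : False := by
      cases rest with
      | nil =>
        simp only [rgRenderP, List.flatMap_nil, List.nil_append] at hdr
        have : rgPat k ++ (rgPat n).tail <+: rgPat k ++ (rgShadowP [] ++ fin) := by
          simp only [rgShadowP, List.flatMap_nil, List.nil_append]
          exact rgPrefix_congr _ _ _ hdr
        exact hpre _ hmem (this.isInfix.trans hinf)
      | cons ck' rest' =>
        have hk'20 : ck'.2 < 20 := by have := hrest ck' (by simp); omega
        rw [rgRenderP_cons, List.append_assoc, List.append_assoc] at hdr
        by_cases hlen : (rgPat n).tail.length ≤ ck'.1.length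
        · have hA : (rgPat n).tail <+: ck'.1 := (List.isPrefix_append_of_length hlen).mp hdr
          have hemb : rgPat k ++ (rgPat n).tail <+:
              rgPat k ++ (rgShadowP (ck' :: rest') ++ fin) := by
            rw [rgShadowP_cons]
            apply rgPrefix_congr
            rw [List.append_assoc, List.append_assoc]
            exact hA.trans (List.prefix_append _ _)
          exact hpre _ hmem (hemb.isInfix.trans hinf)
        · have hB : ck'.1 <+: (rgPat n).tail :=
            List.prefix_of_prefix_length_le (List.prefix_append _ _) hdr (by omega)
          have hw := rgPrefix_peel _ _ _ hdr hB
          have hwd : (rgPat n).tail.drop ck'.1.length = (rgPat n).drop (1 + ck'.1.length) := by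
            rw [show (rgPat n).tail = (rgPat n).drop 1 by simp, List.drop_drop]
          rcases rgPrefix_cases _ _ _ hw with hC | hD
          · -- w <+: repl k'
            rw [hwd] at hC
            have he0 : 0 < 1 + ck'.1.length := by omega
            by_cases hesmall : 1 + ck'.1.length < (rgPat n).length - 1
            · exact factDropPre n ck'.2 _ hn hk'20 he0 hesmall hC
            · have helen : 1 + ck'.1.length < (rgPat n).length := by
                have : ck'.1.length < (rgPat n).tail.length := by omega
                simp at this; omega
              have he : 1 + ck'.1.length = (rgPat n).length - 1 := by omega
              rw [he, rgDrop_last _ hpne] at hC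
              have hrk' : (rgRepl ck'.2).head? = some ((rgPat n).getLast hpne) :=
                rgPrefix_singleton _ _ hC
              have hpk' : (rgPat ck'.2).head? = some ((rgPat n).getLast hpne) := by
                rw [factHeadEq ck'.2 hk'20]; exact hrk'
              -- (rgPat n).tail = ck'.1 ++ [getLast]
              obtain ⟨w2, hw2⟩ := hB
              have hw2len : w2.length = 1 := by
                have := congrArg List.length hw2
                simp at this; omega
              have hw2v : w2 = [(rgPat n).getLast hpne] := by
                have : w2 = (rgPat n).tail.drop ck'.1.length := by
                  rw [← hw2]; simp
                rw [this, hwd, he, rgDrop_last _ hpne]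
              have hemb : rgPat k ++ (rgPat n).tail <+:
                  rgPat k ++ (rgShadowP (ck' :: rest') ++ fin) := by
                rw [rgShadowP_cons, ← hw2, hw2v]
                apply rgPrefix_congr
                rw [List.append_assoc, List.append_assoc]
                apply rgPrefix_congr
                -- [getLast] <+: rgPat ck'.2 ++ ...
                cases hpat : rgPat ck'.2 with
                | nil => rw [hpat] at hpk'; simp at hpk'
                | cons pc pt =>
                  rw [hpat] at hpk'; simp at hpk'
                  exact ⟨pt ++ (rgShadowP rest' ++ fin), by simp [hpk']⟩
              exact hpre _ hmem (hemb.isInfix.trans hinf)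
          · -- repl k' <+: w : repl k' infix of pat n
            have : rgRepl ck'.2 <:+: rgPat n := by
              have h1 : (rgPat n).tail.drop ck'.1.length <:+ rgPat n := by
                rw [hwd]; exact List.drop_suffix _ _
              exact hD.isInfix.trans h1.isInfix
            exact (factNoInfix n ck'.2 hn hk'20).2 this
    exact hfalse
-- one whole-string replace pass equals one sealed-segment pass on the ghost state
theorem rgPassLem (n : ℕ) (hn : n < 20) (hp : 0 < (rgPat n).length) :
    ∀ (prs : List (List Char × ℕ)) (fin : List Char),
      rgSealBound n (prs, fin) → rgPreC (rgShadow (prs, fin)) →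
      rgRep (rgPat n) (rgRepl n) hp (rgRender (prs, fin)) =
        rgRender (rgPass n (rgPat n) hp (prs, fin)) := by
  intro prs
  induction prs with
  | nil =>
    intro fin hb hpre
    simp only [rgRender, rgRenderP, List.flatMap_nil, List.nil_append, rgPass]
    rw [rgRep_intercalate, ← rgFin_render n _ (rgSpl_ne_nil _ hp fin)]
    simp [rgRenderP]
  | cons ck rest ih =>
    intro fin hb hpre
    have hk : ck.2 < n := hb ck (by simp)
    have hk20 : ck.2 < 20 := by omega
    have hshadow_eq : rgShadow (ck :: rest, fin) =
        ck.1 ++ (rgPat ck.2 ++ (rgShadowP rest ++ fin)) := by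
      simp [rgShadow, rgShadowP_cons]
    have hinf1 : ck.1 ++ rgPat ck.2 <:+: rgShadow (ck :: rest, fin) := by
      rw [hshadow_eq]
      exact ⟨[], rgShadowP rest ++ fin, by simp⟩
    have hinf2 : rgPat ck.2 ++ (rgShadowP rest ++ fin) <:+: rgShadow (ck :: rest, fin) := by
      rw [hshadow_eq]
      exact ⟨ck.1, [], by simp⟩
    have hrender_eq : rgRender (ck :: rest, fin) =
        ck.1 ++ (rgRepl ck.2 ++ rgRender (rest, fin)) := by
      simp [rgRender, rgRenderP_cons]
    rw [hrender_eq]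
    rw [rgRep_dist _ _ hp _ _ (by
      intro d hd0 hd1 hand
      exact rgSafe1 n ck.2 hn hk20 ck.1 _ _ hinf1 hpre d hd0 hd1
        ⟨hand.1, hand.2⟩)]
    rw [rgRep_dist _ _ hp _ _ (by
      intro d hd0 hd1 hand
      refine rgSafe2 n ck.2 hn hk20 hk rest (fun ck' h' => hb ck' (by simp [h'])) fin _
        hinf2 hpre d hd0 hd1 ⟨hand.1, ?_⟩
      simpa [rgRender] using hand.2)]
    rw [rgRep_of_not_infix _ _ hp _ (factNoInfix n ck.2 hn hk20).1]
    rw [ih fin (fun ck' h' => hb ck' (by simp [h']))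
        (rgPreC_infix _ _ hpre (by
          rw [hshadow_eq]
          exact ⟨ck.1 ++ rgPat ck.2, [], by simp [rgShadow]⟩))]
    rw [rgRep_intercalate]
    -- assemble the right-hand side
    have hrhs : rgRender (rgPass n (rgPat n) hp (ck :: rest, fin)) =
        (List.intercalate (rgRepl n) (rgSpl (rgPat n) hp ck.1) ++ rgRepl ck.2) ++
          rgRender (rgPass n (rgPat n) hp (rest, fin)) := by
      simp only [rgPass, List.flatMap_cons, rgRender, rgRenderP_append, List.append_assoc]
      rw [rgRenderP_exp n ck.2 _ (rgSpl_ne_nil _ hp ck.1)]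
      simp [List.append_assoc]
    rw [hrhs]
    simp [List.append_assoc]

-- the main loop over the twenty passes
theorem rgLoop : ∀ (m n : ℕ), n + m = 20 →
    ∀ st, rgSealBound n st → rgPreC (rgShadow st) →
    ∃ st',
      ((rgT.drop n).foldl (fun s pr => PySem.Chars.replace s pr.1 pr.2) (rgRender st) =
        rgRender st')
      ∧ ((rgT.drop n).foldl (fun segs pr => segs.foldl (pvPassSeg pr.1 pr.2) [])
          (rgEraseSt st) = rgEraseSt st') := by
  intro m
  induction m with
  | zero =>
    intro n h st hb hpre
    have hn : n = 20 := by omega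
    subst hn
    rw [show rgT.drop 20 = [] by rw [← rgT_len]; exact List.drop_length]
    exact ⟨st, by simp, by simp⟩
  | succ m ih =>
    intro n h st hb hpre
    have hn : n < 20 := by omega
    have hnl : n < rgT.length := by rw [rgT_len]; omega
    have hdrop : rgT.drop n = rgT[n] :: rgT.drop (n + 1) := List.drop_eq_getElem_cons hnl
    have hpat1 : rgT[n].1 = rgPat n := by
      unfold rgPat; rw [List.getD_eq_getElem _ _ hnl]
    have hpat2 : rgT[n].2 = rgRepl n := by
      unfold rgRepl; rw [List.getD_eq_getElem _ _ hnl]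
    have hp : 0 < (rgPat n).length := (factLen n hn).1
    rw [hdrop]
    simp only [List.foldl_cons]
    rw [hpat1, hpat2]
    rw [rgRep_eq_replace _ _ hp, rgPassLem n hn hp st.1 st.2 (by simpa using hb) (by simpa using hpre)]
    rw [rgErase_pass n _ hp st]
    have hst : (st.1, st.2) = st := rfl
    rw [hst]
    exact ih (n + 1) (by omega) (rgPass n (rgPat n) hp st)
      (rgSealBound_pass n _ hp st hb)
      (by rw [rgShadow_pass n _ hp rfl st]; exact hpre)

-- bridges between the String-level ports and the Chars-level loop
theorem rgA_bridge (text : String) :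
    (replace_gradient_vars text).toList =
      rgT.foldl (fun s pr => PySem.Chars.replace s pr.1 pr.2) text.toList := by
  rw [show rgT = pvTable.map (fun pr => (pr.1.toList, pr.2.toList)) from rfl, List.foldl_map]
  simp only [replace_gradient_vars, pvTable, pvGradientMap, List.flatMap_cons, List.flatMap_nil,
    List.foldl_cons, List.foldl_nil, List.nil_append, List.cons_append, List.append_nil]
  simp only [PySem.Str.toList_replace]

theorem rgB_bridge (text : String) :
    replace_gradient_vars_alt text =
      String.ofList (PySem.Chars.join []
        ((rgT.foldl (fun segs pr => segs.foldl (pvPassSeg pr.1 pr.2) [])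
            [(false, text.toList)]).map (fun x => x.2))) := by
  rw [show rgT = pvTable.map (fun pr => (pr.1.toList, pr.2.toList)) from rfl, List.foldl_map]
  rfl

theorem rgJoin_nil : ∀ l : List (List Char), PySem.Chars.join [] l = l.flatten := by
  intro l
  induction l with
  | nil => simp [PySem.Chars.join, List.intercalate]
  | cons a rest ih =>
    cases rest with
    | nil => simp [PySem.Chars.join, List.intercalate]
    | cons b rest' =>
      show List.intercalate [] (a :: b :: rest') = _
      rw [rgInter_cons _ _ _ (by simp)]
      simp only [PySem.Chars.join] at ih
      rw [ih]
      simp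

theorem rgEraseSt_render (st : List (List Char × ℕ) × List Char) :
    ((rgEraseSt st).map (fun x => x.2)).flatten = rgRender st := by
  obtain ⟨prs, fin⟩ := st
  induction prs with
  | nil => simp [rgEraseSt, rgEraseP, rgRender, rgRenderP]
  | cons ck rest ih =>
    simp only [rgEraseSt, rgEraseP, rgRender, rgRenderP, List.flatMap_cons, List.cons_append,
      List.nil_append, List.map_cons, List.map_append, List.flatten_cons, List.flatten_append,
      List.append_assoc] at ih ⊢
    rw [ih]

-- ===== VERDICT (by name: the statement is the Claim_ definition above) =====
theorem replace_gradient_vars_spec : Claim_equal_replace_gradient_vars := by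
  intro text _ hpre
  unfold Spec_replace_gradient_vars
  have h0 : rgSealBound 0 ([], text.toList) := by intro ck hck; simp at hck
  have hpreC : rgPreC (rgShadow ([], text.toList)) := by
    have hsh : rgShadow ([], text.toList) = text.toList := by simp [rgShadow, rgShadowP]
    rw [hsh]
    intro b hb
    unfold Pre_replace_gradient_vars at hpre
    rw [List.all_eq_true] at hpre
    have hb2 := hpre b hb
    simpa [PySem.Chars.isIn_eq_false_iff] using hb2
  obtain ⟨st', hA, hB⟩ := rgLoop 20 0 rfl ([], text.toList) h0 hpreC
  rw [List.drop_zero] at hA hB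
  have hAs : (replace_gradient_vars text).toList = rgRender st' := by
    rw [rgA_bridge]
    have hr : rgRender ([], text.toList) = text.toList := by simp [rgRender, rgRenderP]
    rw [← hr]
    exact hA
  have hBs : (replace_gradient_vars_alt text).toList = rgRender st' := by
    rw [rgB_bridge]
    have he : rgEraseSt ([], text.toList) = [(false, text.toList)] := by
      simp [rgEraseSt, rgEraseP]
    rw [← he, hB, rgJoin_nil, String.toList_ofList]
    exact rgEraseSt_render st'
  have h2 : String.ofList (replace_gradient_vars text).toList
      = String.ofList (replace_gradient_vars_alt text).toList := by rw [hAs, hBs]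
  simpa [String.ofList_toList] using h2
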